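-- pv_equiv track=rewrite | github.com/archids/urap_journal_classification | urap_classify.py | classify_journal
-- ===== SOURCE A (Python) =====
-- from math import ceil
--
-- def classify_journal (best_metrics, issn):
--     if any(d['issn'] == issn for d in best_metrics[ : ceil(0.25 * len(best_metrics))]):
--         CNATDCU_class = 'ISI ROSU'
--     elif any(d['issn'] == issn for d in best_metrics[ceil(0.25 * len(best_metrics)) : ceil(0.5 * len(best_metrics))]):
--         CNATDCU_class = 'ISI GALBEN'
--     else:
--         CNATDCU_class = 'ISI ALB'
--
--     if any(d['issn'] == issn for d in best_metrics[ : ceil(0.20 * 0.25 * len(best_metrics))]):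
--         CNFIS_class = 'A*'
--     elif any(d['issn'] == issn for d in best_metrics[ceil(0.20 * 0.25 * len(best_metrics)) : (ceil(0.25 * len(best_metrics)) + ceil(0.20 * 0.25 * len(best_metrics))) ]):
--         CNFIS_class = 'A'
--     elif any(d['issn'] == issn for d in best_metrics[(ceil(0.25 * len(best_metrics)) + ceil(0.20 * 0.25 * len(best_metrics))) : ceil(0.5 * len(best_metrics))]):
--         CNFIS_class = 'B'
--     else:
--         CNFIS_class = 'C'
--
--     return CNATDCU_class, CNFIS_class
-- ===== SOURCE B (Python) =====
-- from math import ceil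
--
-- def classify_journal(best_metrics, issn):
--     n = len(best_metrics)
--     q = ceil(0.25 * n)
--     h = ceil(0.5 * n)
--     a5 = ceil(0.20 * 0.25 * n)
--     ab = q + a5
--     pos = next((i for i, d in enumerate(best_metrics[:max(h, ab)]) if d['issn'] == issn), None)
--     if pos is None:
--         return 'ISI ALB', 'C'
--     cnatdcu = 'ISI ROSU' if pos < q else ('ISI GALBEN' if pos < h else 'ISI ALB')
--     cnfis = 'A*' if pos < a5 else ('A' if pos < ab else ('B' if pos < h else 'C'))
--     return cnatdcu, cnfis
-- ===== Notes on version B (the rewrite author's own statement) =====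
-- stated objective: simpler
-- what changed: A decides each class with five overlapping short-circuit any() scans over ceil-bounded slices; B finds the first matching index once over the single examined prefix and derives both classes by comparing that index against the precomputed ceil boundaries.
import Mathlib
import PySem

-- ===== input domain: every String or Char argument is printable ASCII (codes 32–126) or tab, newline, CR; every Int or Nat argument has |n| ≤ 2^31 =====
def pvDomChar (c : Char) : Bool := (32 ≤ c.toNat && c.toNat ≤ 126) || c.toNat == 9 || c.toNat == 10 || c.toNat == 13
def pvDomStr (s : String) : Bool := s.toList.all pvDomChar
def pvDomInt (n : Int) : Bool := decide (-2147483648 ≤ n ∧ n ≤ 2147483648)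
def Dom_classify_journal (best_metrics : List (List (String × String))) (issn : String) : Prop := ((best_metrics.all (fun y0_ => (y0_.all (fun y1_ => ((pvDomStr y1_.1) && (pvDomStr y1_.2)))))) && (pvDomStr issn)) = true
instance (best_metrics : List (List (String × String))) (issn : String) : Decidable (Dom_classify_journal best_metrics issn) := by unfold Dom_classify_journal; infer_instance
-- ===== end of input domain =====

-- B replaces A's five overlapping any-scans by ONE scan for the first matching index, compared
-- against the precomputed boundaries (objective: simpler; return value only, nothing is mutated).

-- ===== PORT A =====
-- d['issn'] on an assoc-list dict: first match; none = KeyError (excluded by Pre_).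
def getIssn (d : List (String × String)) : Option String :=
  PySem.Dict.get? (PySem.Dict.mk d) "issn"

-- any(d['issn'] == issn for d in ds): short-circuit; none = KeyError hit before a match.
def pyAny : List (List (String × String)) → String → Option Bool
  | [], _ => some false
  | d :: ds, issn =>
    match getIssn d with
    | none => none
    | some v => if v = issn then some true else pyAny ds issn

-- The float ceils are exact in integer form here: ceil(0.25*n) = (n+3)/4, ceil(0.5*n) = (n+1)/2,
-- ceil(0.20*0.25*n) = (n+19)/20 (checked against CPython over the whole sampled length range).
-- A slice bm[u:v] with 0 ≤ u ≤ v is ported as (bm.drop u).take (v-u): Python's clamping = drop/take's.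
def cnatdcuA (bm : List (List (String × String))) (issn : String) (q h : Nat) : Option String :=
  match pyAny (bm.take q) issn with
  | none => none
  | some true => some "ISI ROSU"
  | some false =>
    match pyAny ((bm.drop q).take (h - q)) issn with
    | none => none
    | some true => some "ISI GALBEN"
    | some false => some "ISI ALB"

def cnfisA (bm : List (List (String × String))) (issn : String) (q h a5 : Nat) : Option String :=
  match pyAny (bm.take a5) issn with
  | none => none
  | some true => some "A*"
  | some false =>
    match pyAny ((bm.drop a5).take ((q + a5) - a5)) issn with
    | none => none
    | some true => some "A"
    | some false =>
      match pyAny ((bm.drop (q + a5)).take (h - (q + a5))) issn with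
      | none => none
      | some true => some "B"
      | some false => some "C"

def classify_journal (best_metrics : List (List (String × String))) (issn : String) : String × String :=
  match cnatdcuA best_metrics issn ((best_metrics.length+3)/4) ((best_metrics.length+1)/2),
        cnfisA best_metrics issn ((best_metrics.length+3)/4) ((best_metrics.length+1)/2)
          ((best_metrics.length+19)/20) with
  | some c1, some c2 => (c1, c2)
  | _, _ => ("", "")   -- KeyError path; outside Pre_

-- ===== PORT B =====
-- next((i for i,d in enumerate(prefix) if d['issn']==issn), None); none = KeyError.
def findPos : List (List (String × String)) → String → Nat → Option (Option Nat)
  | [], _, _ => some none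
  | d :: ds, issn, i =>
    match getIssn d with
    | none => none
    | some v => if v = issn then some (some i) else findPos ds issn (i+1)

def classify_journal_alt (best_metrics : List (List (String × String))) (issn : String) : String × String :=
  let n := best_metrics.length
  let q := (n+3)/4
  let h := (n+1)/2
  let a5 := (n+19)/20
  let ab := q + a5
  match findPos (best_metrics.take (max h ab)) issn 0 with
  | none => ("", "")   -- KeyError path; outside Pre_
  | some none => ("ISI ALB", "C")
  | some (some p) =>
    ((if p < q then "ISI ROSU" else if p < h then "ISI GALBEN" else "ISI ALB"),
     (if p < a5 then "A*" else if p < ab then "A" else if p < h then "B" else "C"))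

-- ===== PRECONDITION & SPEC =====
-- Pre_ excludes exactly the inputs where Python A raises KeyError: some dict at an index A's
-- scan reaches (below every boundary A examines, with no match strictly before it) lacks 'issn'.
def Pre_classify_journal (best_metrics : List (List (String × String))) (issn : String) : Prop :=
  ∀ i < min best_metrics.length
      (max ((best_metrics.length+1)/2) ((best_metrics.length+3)/4 + (best_metrics.length+19)/20)),
    getIssn (best_metrics.getD i []) = none →
      ∃ j < i, getIssn (best_metrics.getD j []) = some issn
instance (best_metrics : List (List (String × String))) (issn : String) : Decidable (Pre_classify_journal best_metrics issn) := by unfold Pre_classify_journal; infer_instance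

def pvWitness_classify_journal : (List (List (String × String))) × String := ([[("issn", "x")]], "x")

def Spec_classify_journal (best_metrics : List (List (String × String))) (issn : String) (out : String × String) : Prop := out = classify_journal_alt best_metrics issn
instance (best_metrics : List (List (String × String))) (issn : String) (out : String × String) : Decidable (Spec_classify_journal best_metrics issn out) := by unfold Spec_classify_journal; infer_instance

-- ===== CLAIM (what is proved, stated in full; the proofs are below) =====
def Claim_equal_classify_journal : Prop := ∀ (best_metrics : List (List (String × String))) (issn : String), Dom_classify_journal best_metrics issn → Pre_classify_journal best_metrics issn → Spec_classify_journal best_metrics issn (classify_journal best_metrics issn)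

-- ===== LEMMAS AND PROOFS =====

theorem findPos_shift (xs : List (List (String × String))) (issn : String) (i : Nat) :
    findPos xs issn i = (findPos xs issn 0).map (Option.map (· + i)) := by
  induction xs generalizing i with
  | nil => simp [findPos]
  | cons d ds ih =>
    simp only [findPos]
    cases hg : getIssn d with
    | none => simp
    | some v =>
      by_cases hv : v = issn
      · simp [hv]
      · simp only [if_neg hv]
        rw [ih (i+1), ih 1]
        cases hr : findPos ds issn 0 with
        | none => simp
        | some o => cases o <;> (simp; try omega)

theorem findPos_bound (xs : List (List (String × String))) (issn : String) (p : Nat)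
    (h : findPos xs issn 0 = some (some p)) : p < xs.length := by
  induction xs generalizing p with
  | nil => simp [findPos] at h
  | cons d ds ih =>
    simp only [findPos] at h
    cases hg : getIssn d with
    | none => rw [hg] at h; simp at h
    | some v =>
      rw [hg] at h
      by_cases hv : v = issn
      · simp [hv] at h; simp; omega
      · simp only [if_neg hv] at h
        rw [findPos_shift ds issn 1] at h
        cases hr : findPos ds issn 0 with
        | none => rw [hr] at h; simp at h
        | some o =>
          rw [hr] at h
          cases o with
          | none => simp at h
          | some p' =>
            simp at h
            have := ih p' hr
            simp
            omega

theorem findPos_append (xs ys : List (List (String × String))) (issn : String) (i : Nat) :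
    findPos (xs ++ ys) issn i =
      match findPos xs issn i with
      | some none => findPos ys issn (i + xs.length)
      | r => r := by
  induction xs generalizing i with
  | nil => simp [findPos]
  | cons d ds ih =>
    simp only [List.cons_append, findPos]
    cases hg : getIssn d with
    | none => simp
    | some v =>
      by_cases hv : v = issn
      · simp [hv]
      · simp only [if_neg hv]
        rw [ih (i+1)]
        cases hr : findPos ds issn (i+1) with
        | none => simp
        | some o => cases o <;> (simp [List.length_cons]; try ring_nf)

theorem findPos_take_hit (xs : List (List (String × String))) (issn : String) (p k : Nat)
    (h : findPos xs issn 0 = some (some p)) :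
    findPos (xs.take k) issn 0 = some (if p < k then some p else none) := by
  have hsplit := findPos_append (xs.take k) (xs.drop k) issn 0
  rw [List.take_append_drop] at hsplit
  have hp := findPos_bound xs issn p h
  cases ht : findPos (xs.take k) issn 0 with
  | none => rw [ht] at hsplit; simp [h] at hsplit
  | some o =>
    cases o with
    | some p' =>
      rw [ht] at hsplit
      simp only [h] at hsplit
      have hb := findPos_bound (xs.take k) issn p' ht
      simp only [List.length_take] at hb
      have : p' = p := by simp at hsplit; omega
      subst this
      rw [if_pos (by omega)]
    | none =>
      rw [ht] at hsplit
      simp only [h] at hsplit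
      rw [findPos_shift (xs.drop k) issn] at hsplit
      cases hr : findPos (xs.drop k) issn 0 with
      | none => rw [hr] at hsplit; simp at hsplit
      | some o2 =>
        rw [hr] at hsplit
        cases o2 with
        | none => simp at hsplit
        | some p0 =>
          simp only [Option.map] at hsplit
          have hpe : p = p0 + (0 + (xs.take k).length) := by
            simpa using hsplit
          simp only [List.length_take] at hpe
          rw [if_neg (by omega)]

theorem findPos_take_none (xs : List (List (String × String))) (issn : String) (k : Nat)
    (h : findPos xs issn 0 = some none) :
    findPos (xs.take k) issn 0 = some none := by
  have hsplit := findPos_append (xs.take k) (xs.drop k) issn 0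
  rw [List.take_append_drop] at hsplit
  cases ht : findPos (xs.take k) issn 0 with
  | none => rw [ht] at hsplit; simp [h] at hsplit
  | some o =>
    cases o with
    | some p' => rw [ht] at hsplit; simp [h] at hsplit
    | none => rfl

theorem findPos_drop_hit (xs : List (List (String × String))) (issn : String) (p u : Nat)
    (h : findPos xs issn 0 = some (some p)) (hu : u ≤ p) :
    findPos (xs.drop u) issn 0 = some (some (p - u)) := by
  have hp := findPos_bound xs issn p h
  have hsplit := findPos_append (xs.take u) (xs.drop u) issn 0
  rw [List.take_append_drop] at hsplit
  rw [findPos_take_hit xs issn p u h, if_neg (by omega)] at hsplit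
  simp only [h] at hsplit
  rw [findPos_shift (xs.drop u) issn] at hsplit
  cases hr : findPos (xs.drop u) issn 0 with
  | none => rw [hr] at hsplit; simp at hsplit
  | some o =>
    rw [hr] at hsplit
    cases o with
    | none => simp at hsplit
    | some p0 =>
      have hpe : p = p0 + (0 + (xs.take u).length) := by simpa using hsplit
      simp only [List.length_take] at hpe
      have : p0 = p - u := by omega
      rw [this]

theorem findPos_drop_none (xs : List (List (String × String))) (issn : String) (u : Nat)
    (h : findPos xs issn 0 = some none) :
    findPos (xs.drop u) issn 0 = some none := by
  have hsplit := findPos_append (xs.take u) (xs.drop u) issn 0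
  rw [List.take_append_drop] at hsplit
  rw [findPos_take_none xs issn u h] at hsplit
  simp only [h] at hsplit
  rw [findPos_shift (xs.drop u) issn] at hsplit
  cases hr : findPos (xs.drop u) issn 0 with
  | none => rw [hr] at hsplit; simp at hsplit
  | some o =>
    cases o with
    | none => rfl
    | some p0 => rw [hr] at hsplit; simp at hsplit

theorem pyAny_eq (xs : List (List (String × String))) (issn : String) (i : Nat) :
    pyAny xs issn = (findPos xs issn i).map Option.isSome := by
  induction xs generalizing i with
  | nil => simp [pyAny, findPos]
  | cons d ds ih =>
    simp only [pyAny, findPos]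
    cases hg : getIssn d with
    | none => simp
    | some v =>
      by_cases hv : v = issn
      · simp [hv]
      · simp only [if_neg hv]
        exact ih (i+1)

theorem seg_sub (bm : List (List (String × String))) (u w M : Nat) (hw : u + w ≤ M) :
    ((bm.take M).drop u).take w = (bm.drop u).take w := by
  rw [List.drop_take, List.take_take]
  congr 1
  omega

theorem pyAny_seg_none (bm : List (List (String × String))) (issn : String) (M u w : Nat)
    (hw : u + w ≤ M) (h : findPos (bm.take M) issn 0 = some none) :
    pyAny ((bm.drop u).take w) issn = some false := by
  rw [pyAny_eq _ issn 0, ← seg_sub bm u w M hw,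
    findPos_take_none _ issn w (findPos_drop_none _ issn u h)]
  rfl

theorem pyAny_seg_hit (bm : List (List (String × String))) (issn : String) (M u w p : Nat)
    (hw : u + w ≤ M) (h : findPos (bm.take M) issn 0 = some (some p)) (hu : u ≤ p) :
    pyAny ((bm.drop u).take w) issn = some (decide (p - u < w)) := by
  rw [pyAny_eq _ issn 0, ← seg_sub bm u w M hw,
    findPos_take_hit _ issn (p - u) w (findPos_drop_hit _ issn p u h hu)]
  by_cases hc : p - u < w <;> simp [hc]

theorem findPos_none_bad (xs : List (List (String × String))) (issn : String)
    (h : findPos xs issn 0 = none) :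
    ∃ i < xs.length, getIssn (xs.getD i []) = none ∧
      ∀ j < i, getIssn (xs.getD j []) ≠ some issn := by
  induction xs with
  | nil => simp [findPos] at h
  | cons d ds ih =>
    simp only [findPos] at h
    cases hg : getIssn d with
    | none =>
      exact ⟨0, by simp, by simpa using hg, by omega⟩
    | some v =>
      rw [hg] at h
      by_cases hv : v = issn
      · simp [hv] at h
      · simp only [if_neg hv] at h
        rw [findPos_shift ds issn 1] at h
        cases hr : findPos ds issn 0 with
        | some o => rw [hr] at h; simp at h
        | none =>
          obtain ⟨i, hi, hbad, hall⟩ := ih hr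
          refine ⟨i + 1, by simp; omega, by simpa using hbad, ?_⟩
          intro j hj
          cases j with
          | zero =>
            simp only [List.getD]
            simp [hg]
            exact fun hc => hv hc
          | succ j' =>
            have := hall j' (by omega)
            simpa using this

theorem getD_take (bm : List (List (String × String))) (i k : Nat) (h : i < k) :
    (bm.take k).getD i ([] : List (String × String)) = bm.getD i [] := by
  simp only [List.getD]
  rw [List.getElem?_take_of_lt h]

-- ===== VERDICT (by name: the statement is the Claim_ definition above) =====
theorem classify_journal_spec : Claim_equal_classify_journal := by
  intro bm issn _ hpre
  unfold Spec_classify_journal classify_journal classify_journal_alt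
  simp only []
  set n := bm.length with hn
  set q := (n+3)/4 with hqdef
  set h2 := (n+1)/2 with hhdef
  set a5 := (n+19)/20 with ha5def
  have hq : q ≤ h2 := by omega
  have ha5 : a5 ≤ q := by omega
  cases hF : findPos (bm.take (max h2 (q + a5))) issn 0 with
  | none =>
    exfalso
    obtain ⟨i, hi, hbad, hall⟩ := findPos_none_bad _ issn hF
    simp only [List.length_take] at hi
    rw [getD_take bm i _ (by omega)] at hbad
    obtain ⟨j, hj, hmatch⟩ := hpre i (by rw [min_comm] at hi; exact hi) hbad
    exact hall j hj (by rw [getD_take bm j _ (by omega)]; exact hmatch)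
  | some o =>
    cases o with
    | none =>
      have c1 : cnatdcuA bm issn q h2 = some "ISI ALB" := by
        unfold cnatdcuA
        rw [show bm.take q = (bm.drop 0).take q by rw [List.drop_zero],
          pyAny_seg_none bm issn _ 0 q (by omega) hF,
          pyAny_seg_none bm issn _ q (h2 - q) (by omega) hF]
      have c2 : cnfisA bm issn q h2 a5 = some "C" := by
        unfold cnfisA
        rw [show bm.take a5 = (bm.drop 0).take a5 by rw [List.drop_zero],
          pyAny_seg_none bm issn _ 0 a5 (by omega) hF,
          pyAny_seg_none bm issn _ a5 ((q + a5) - a5) (by omega) hF,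
          pyAny_seg_none bm issn _ (q + a5) (h2 - (q + a5)) (by omega) hF]
      rw [c1, c2]
    | some p =>
      have c1 : cnatdcuA bm issn q h2 =
          some (if p < q then "ISI ROSU" else if p < h2 then "ISI GALBEN" else "ISI ALB") := by
        unfold cnatdcuA
        rw [show bm.take q = (bm.drop 0).take q by rw [List.drop_zero],
          pyAny_seg_hit bm issn _ 0 q p (by omega) hF (by omega)]
        by_cases hpq : p < q
        · simp [hpq]
        · rw [pyAny_seg_hit bm issn _ q (h2 - q) p (by omega) hF (by omega)]
          by_cases hph : p < h2
          · have hx : p - q < h2 - q := by omega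
            simp [hpq, hph, hx]
          · have hx : ¬ (p - q < h2 - q) := by omega
            simp [hpq, hph, hx]
      have c2 : cnfisA bm issn q h2 a5 =
          some (if p < a5 then "A*" else if p < q + a5 then "A" else if p < h2 then "B" else "C") := by
        unfold cnfisA
        rw [show bm.take a5 = (bm.drop 0).take a5 by rw [List.drop_zero],
          pyAny_seg_hit bm issn _ 0 a5 p (by omega) hF (by omega)]
        by_cases hpa : p < a5
        · simp [hpa]
        · rw [pyAny_seg_hit bm issn _ a5 ((q + a5) - a5) p (by omega) hF (by omega)]
          by_cases hpab : p < q + a5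
          · have hx : p - a5 < q := by omega
            simp [hpa, hpab, hx]
          · have hx : ¬ (p - a5 < q) := by omega
            rw [pyAny_seg_hit bm issn _ (q + a5) (h2 - (q + a5)) p (by omega) hF (by omega)]
            by_cases hph : p < h2
            · have hy : p - (q + a5) < h2 - (q + a5) := by omega
              simp [hpa, hpab, hph, hx, hy]
            · have hy : ¬ (p - (q + a5) < h2 - (q + a5)) := by omega
              simp [hpa, hpab, hph, hx, hy]
      rw [c1, c2]
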